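-- pv_equiv track=rewrite | github.com/karinecavalcanti/Python_Journey | menor_valor.py | m_valores
-- ===== SOURCE A (Python) =====
-- def menor_valor(n):
--     menor = n[0]
--     for i in n:
--         if i < menor:
--             menor = i
--     return menor
--
-- def m_valores(n,m):
--     n_distintos = list(set(n))
--     vetor = []
--     for j in range(m):
--         menor = menor_valor(n_distintos)
--         vetor.append(menor)
--         n_distintos.remove(menor)
--     return vetor
-- ===== SOURCE B (Python) =====
-- def m_valores(n, m):
--     dist = sorted(set(n))
--     return dist[:m] if m > 0 else []
-- ===== Notes on version B (the rewrite author's own statement) =====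
-- stated objective: faster
-- what changed: Replaces the m rounds of linear min-scan-and-remove over the distinct values by one sort of the distinct values followed by taking a prefix slice.
-- outside the precondition, e.g. on m_valores([1, 1], 3): A raises IndexError, B returns [1]
-- crash fix: When m exceeds the number of distinct values (including m>0 with empty n), A raises IndexError inside menor_valor; B returns the whole sorted list of distinct values. — e.g. on m_valores([1, 1], 3): A raises IndexError, B returns [1]
import Mathlib
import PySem

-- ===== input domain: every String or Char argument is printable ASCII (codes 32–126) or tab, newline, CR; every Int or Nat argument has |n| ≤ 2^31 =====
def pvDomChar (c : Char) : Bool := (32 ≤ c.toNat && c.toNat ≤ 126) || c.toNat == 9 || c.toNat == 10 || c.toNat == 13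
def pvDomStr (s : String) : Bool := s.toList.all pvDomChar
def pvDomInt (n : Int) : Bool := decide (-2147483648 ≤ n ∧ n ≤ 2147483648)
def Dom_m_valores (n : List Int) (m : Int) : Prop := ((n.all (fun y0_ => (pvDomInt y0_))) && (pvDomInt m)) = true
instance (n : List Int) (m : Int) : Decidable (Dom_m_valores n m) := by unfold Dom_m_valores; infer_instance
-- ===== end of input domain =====

-- B replaces A's m rounds of linear min-scan-and-remove by sorting the distinct values once and taking a prefix.


-- ===== PORT A =====
-- menor_valor(n): menor = n[0]; for i in n: if i < menor: menor = i; return menor.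
-- none = the IndexError on an empty list (excluded by Pre_).
def menorValor (n : List Int) : Option Int :=
  (PySem.List.pyGet? n 0).map (fun m0 => n.foldl (fun menor i => if i < menor then i else menor) m0)

-- the body of 'for j in range(m)': one iteration per fuel unit; 'none' from menorValor
-- (Python's IndexError) stops with the current vetor — Pre_ excludes those inputs.
-- n_distintos.remove(menor) never raises since menor ∈ n_distintos, so getD is only a totality guard.
def mValLoop : Nat → List Int → List Int → List Int
  | 0, _, vetor => vetor
  | k + 1, nd, vetor =>
    match menorValor nd with
    | none => vetor
    | some menor => mValLoop k ((PySem.List.remove? nd menor).getD nd) (vetor ++ [menor])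

def m_valores (n : List Int) (m : Int) : List Int :=
  mValLoop m.toNat (PySem.Set.ofList n) []

-- ===== PORT B =====
def m_valores_alt (n : List Int) (m : Int) : List Int :=
  let dist := PySem.List.sorted (PySem.Set.ofList n) (fun x => x) false
  if m > 0 then PySem.List.slice dist none (some m) else []

-- ===== PRECONDITION & SPEC =====
-- A raises IndexError (inside menor_valor) as soon as the distinct values run out,
-- i.e. exactly when m exceeds the number of distinct elements of n; those inputs are excluded.
def Pre_m_valores (n : List Int) (m : Int) : Prop := m ≤ (PySem.Set.ofList n).length
instance (n : List Int) (m : Int) : Decidable (Pre_m_valores n m) := by unfold Pre_m_valores; infer_instance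

def pvWitness_m_valores : List Int × Int := ([3, 1, 2, 1], 2)

-- When m exceeds the number of distinct values of n, A raises IndexError; B returns the whole sorted list of distinct values.
def Raises_m_valores (n : List Int) (m : Int) : Prop := (PySem.Set.ofList n).length < m
instance (n : List Int) (m : Int) : Decidable (Raises_m_valores n m) := by unfold Raises_m_valores; infer_instance
def pvRaiseWitness_m_valores : List Int × Int := ([1, 1], 3)
def pvRaiseWitnessOut_m_valores : List Int := [1]

def Spec_m_valores (n : List Int) (m : Int) (out : List Int) : Prop := out = m_valores_alt n m
instance (n : List Int) (m : Int) (out : List Int) : Decidable (Spec_m_valores n m out) := by unfold Spec_m_valores; infer_instance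

-- ===== CLAIM (what is proved, stated in full; the proofs are below) =====
def Claim_equal_m_valores : Prop := ∀ (n : List Int) (m : Int), Dom_m_valores n m → Pre_m_valores n m → Spec_m_valores n m (m_valores n m)
def Claim_raises_m_valores : Prop := (∀ (n : List Int) (m : Int), Dom_m_valores n m → Raises_m_valores n m → ¬ Pre_m_valores n m) ∧ (Dom_m_valores (pvRaiseWitness_m_valores.1) (pvRaiseWitness_m_valores.2) ∧ Raises_m_valores (pvRaiseWitness_m_valores.1) (pvRaiseWitness_m_valores.2) ∧ m_valores_alt (pvRaiseWitness_m_valores.1) (pvRaiseWitness_m_valores.2) = pvRaiseWitnessOut_m_valores)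

-- ===== LEMMAS AND PROOFS =====

-- the fold in menor_valor returns its accumulator or a list element …
theorem foldMin_mem (l : List Int) (a : Int) :
    l.foldl (fun menor i => if i < menor then i else menor) a = a ∨
    l.foldl (fun menor i => if i < menor then i else menor) a ∈ l := by
  induction l generalizing a with
  | nil => exact Or.inl rfl
  | cons h t ih =>
    simp only [List.foldl_cons]
    rcases ih (if h < a then h else a) with hc | hc
    · rw [hc]; split_ifs at hc ⊢ with hlt
      · exact Or.inr (by simp)
      · exact Or.inl rfl
    · exact Or.inr (List.mem_cons_of_mem _ hc)

-- … and is a lower bound of the accumulator and every list element.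
theorem foldMin_le (l : List Int) (a : Int) :
    l.foldl (fun menor i => if i < menor then i else menor) a ≤ a ∧
    ∀ x ∈ l, l.foldl (fun menor i => if i < menor then i else menor) a ≤ x := by
  induction l generalizing a with
  | nil => exact ⟨le_refl a, by simp⟩
  | cons h t ih =>
    obtain ⟨h1, h2⟩ := ih (if h < a then h else a)
    simp only [List.foldl_cons]
    refine ⟨le_trans h1 (by split_ifs with hlt <;> omega), ?_⟩
    intro x hx
    rcases List.mem_cons.mp hx with rfl | hx
    · exact le_trans h1 (by split_ifs with hlt <;> omega)
    · exact h2 x hx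

-- on a nodup list, menor_valor returns the head of the sorted list
theorem menorValor_eq_head (nd : List Int) (mn : Int) (rest : List Int)
    (hs : PySem.List.sorted nd (fun x => x) false = mn :: rest) :
    menorValor nd = some mn := by
  have hne : nd ≠ [] := by
    intro h; rw [h] at hs; simp [PySem.List.sorted] at hs
  obtain ⟨h, t, rfl⟩ := List.exists_cons_of_ne_nil hne
  have hget : PySem.List.pyGet? (h :: t) 0 = some h := by
    simp [PySem.List.pyGet?, PySem.List.pyIdx?]
  simp only [menorValor, hget, Option.map_some, Option.some.injEq]
  set f := fun (menor i : Int) => if i < menor then i else menor with hf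
  have hmem : (h :: t).foldl f h ∈ h :: t := by
    rcases foldMin_mem (h :: t) h with hc | hc
    · rw [hc]; exact List.mem_cons_self
    · exact hc
  have hle : ∀ x ∈ h :: t, (h :: t).foldl f h ≤ x := (foldMin_le (h :: t) h).2
  have hmn_mem : mn ∈ h :: t := by
    have := PySem.List.mem_sorted (xs := h :: t) (key := fun x => x) false mn
    rw [hs] at this; exact this.mp List.mem_cons_self
  have hmin : ∀ y ∈ h :: t, mn ≤ y := by
    intro y hy
    exact PySem.List.key_head_sorted_le (h :: t) (fun x => x) hs y hy
  exact le_antisymm (hle mn hmn_mem) (hmin _ hmem)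

-- one loop round peels the head of the sorted list
theorem sorted_erase (nd : List Int) (hnd : nd.Nodup) (mn : Int) (rest : List Int)
    (hs : PySem.List.sorted nd (fun x => x) false = mn :: rest) :
    PySem.List.sorted (nd.erase mn) (fun x => x) false = rest := by
  have hperm : (mn :: rest).Perm nd := hs ▸ PySem.List.sorted_perm nd _ false
  have hle : (mn :: rest).Pairwise (fun a b : Int => a ≤ b) := by
    have := PySem.List.sorted_pairwise (xs := nd) (key := fun x : Int => x)
    rwa [hs] at this
  have hnodup : (mn :: rest).Nodup := hperm.nodup_iff.mpr hnd
  have hpw : (mn :: rest).Pairwise (fun a b : Int => a < b) :=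
    (hle.and hnodup).imp (fun h => lt_of_le_of_ne h.1 h.2)
  have hrp : rest.Perm (nd.erase mn) := by
    have := (hperm.symm).erase mn
    simpa [List.erase_cons_head] using this.symm
  exact PySem.List.sorted_eq_of_perm_of_pairwise_lt _ _ _ hrp (List.Pairwise.of_cons hpw)

-- main loop invariant: with fuel k ≤ |nd| and nd nodup, the loop appends the first k of sorted nd
theorem mValLoop_eq (k : Nat) (nd acc : List Int) (hnd : nd.Nodup)
    (hk : k ≤ nd.length) :
    mValLoop k nd acc = acc ++ (PySem.List.sorted nd (fun x => x) false).take k := by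
  induction k generalizing nd acc with
  | zero => simp [mValLoop]
    -- (take 0 = [])
  | succ k ih =>
    have hlen : (PySem.List.sorted nd (fun x => x) false).length = nd.length :=
      PySem.List.length_sorted nd _ false
    obtain ⟨mn, rest, hs⟩ : ∃ mn rest, PySem.List.sorted nd (fun x => x) false = mn :: rest := by
      cases h : PySem.List.sorted nd (fun x => x) false with
      | nil => rw [h] at hlen; simp at hlen; omega
      | cons a b => exact ⟨a, b, rfl⟩
    have hmv : menorValor nd = some mn := menorValor_eq_head nd mn rest hs
    have hmem : mn ∈ nd := by
      have := PySem.List.mem_sorted (xs := nd) (key := fun x : Int => x) false mn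
      rw [hs] at this; exact this.mp List.mem_cons_self
    have hrem : PySem.List.remove? nd mn = some (nd.erase mn) :=
      PySem.List.remove?_eq_some_erase nd mn hmem
    have hlen2 : (nd.erase mn).length = nd.length - 1 := List.length_erase_of_mem hmem
    simp only [mValLoop, hmv, hrem, Option.getD_some]
    rw [ih (nd.erase mn) (acc ++ [mn]) (hnd.erase mn) (by omega)]
    rw [sorted_erase nd hnd mn rest hs, hs]
    simp

-- ===== VERDICT (by name: the statement is the Claim_ definition above) =====
theorem m_valores_spec : Claim_equal_m_valores := by
  intro n m _ hpre
  unfold Spec_m_valores m_valores m_valores_alt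
  unfold Pre_m_valores at hpre
  have hnodup : (PySem.Set.ofList n).Nodup := PySem.Set.nodup_ofList n
  by_cases hm : m > 0
  · have hmn : 0 ≤ m := le_of_lt hm
    rw [mValLoop_eq m.toNat (PySem.Set.ofList n) [] hnodup (by omega)]
    simp only [hm, if_true, List.nil_append]
    rw [PySem.List.slice_to _ hmn]
  · have : m.toNat = 0 := by omega
    rw [this]
    simp [mValLoop, hm]

@[simp] theorem m_valores_raises : Claim_raises_m_valores := by
  unfold Claim_raises_m_valores
  refine ⟨?_, by decide⟩
  intro n m _ hr hp
  exact absurd hp (by unfold Pre_m_valores Raises_m_valores at *; omega)
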